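-- pv_equiv track=rewrite | github.com/sangmoonhan/codetree-TILs | 240102/2개 이상의 알파벳/more-than-one-alphabet.py | diffe
-- ===== SOURCE A (Python) =====
-- def diffe(ch):
--
--     ch = list(ch)
--
--     cnt = 0
--
--     for i in range(len(ch)):
--
--         if i == 0 :
--             cnt += 1
--             continue
--
--         if ch[i] in ch[:i] :
--             continue
--         else:
--             cnt += 1
--
--     if cnt >= 2 :
--         return "Yes"
--     else :
--         return "No"
-- ===== SOURCE B (Python) =====
-- def diffe(ch):
--     found = False
--     first = None
--     for i, c in enumerate(ch):
--         if i == 0: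
--             first = c
--         elif c != first:
--             found = True
--             break
--     return "Yes" if found else "No"
-- ===== Notes on version B (the rewrite author's own statement) =====
-- stated objective: simpler
-- what changed: Instead of counting distinct characters via a quadratic prefix-membership scan, B records the first character and scans the rest for one that differs, short-circuiting at the first difference.
import Mathlib
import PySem

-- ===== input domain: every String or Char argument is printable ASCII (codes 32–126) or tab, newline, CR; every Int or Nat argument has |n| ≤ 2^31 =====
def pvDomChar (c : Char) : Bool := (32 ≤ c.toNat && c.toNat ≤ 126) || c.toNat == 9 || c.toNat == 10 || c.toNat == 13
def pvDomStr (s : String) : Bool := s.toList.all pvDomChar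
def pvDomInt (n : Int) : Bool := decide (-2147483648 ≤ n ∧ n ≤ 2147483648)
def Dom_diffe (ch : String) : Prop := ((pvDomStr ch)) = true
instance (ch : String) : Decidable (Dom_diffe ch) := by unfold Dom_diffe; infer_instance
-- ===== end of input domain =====

-- B replaces A's quadratic distinct-character count (prefix membership per index)
-- with a linear scan comparing every later character to the first one, short-circuiting.

-- ===== PORT A =====
-- one loop step of A: i == 0 always counts; otherwise count iff ch[i] not in ch[:i]
def diffeStep (l : List Char) (cnt : Int) (i : Int) : Int :=
  if i == 0 then cnt + 1
  else if (PySem.List.slice l (some 0) (some i)).contains (PySem.List.pyGetD l i ' ') then cnt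
  else cnt + 1

def diffe (ch : String) : String :=
  let l := ch.toList
  let cnt : Int := (PySem.List.pyRange 0 (l.length : Int) 1).foldl (diffeStep l) 0
  if cnt ≥ 2 then "Yes" else "No"

-- ===== PORT B =====
def diffe_alt (ch : String) : String :=
  match ch.toList with
  | [] => "No"
  | first :: rest => if rest.any (fun c => c != first) then "Yes" else "No"

-- ===== PRECONDITION & SPEC =====
def Spec_diffe (ch : String) (out : String) : Prop := out = diffe_alt ch
instance (ch : String) (out : String) : Decidable (Spec_diffe ch out) := by unfold Spec_diffe; infer_instance

-- ===== CLAIM (what is proved, stated in full; the proofs are below) =====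
def Claim_equal_diffe : Prop := ∀ (ch : String), Dom_diffe ch → Spec_diffe ch (diffe ch)

-- ===== LEMMAS AND PROOFS =====

-- A's loop invariant: after the first k iterations, cnt is the number of distinct
-- characters among the first k characters.
theorem diffe_fold_inv (l : List Char) (k : Nat) (hk : k ≤ l.length) :
    (PySem.List.pyRange 0 (k : Int) 1).foldl (diffeStep l) 0 = ((l.take k).toFinset.card : Int) := by
  induction k with
  | zero => simp [PySem.List.pyRange_one_eq_nil]
  | succ k ih =>
    have hk' : k ≤ l.length := Nat.le_of_succ_le hk
    have hlt : k < l.length := hk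
    have hr : PySem.List.pyRange 0 ((k + 1 : Nat) : Int) 1
        = PySem.List.pyRange 0 (k : Int) 1 ++ [(k : Int)] := by
      push_cast
      exact PySem.List.pyRange_one_succ_right (by positivity)
    rw [hr, List.foldl_append, ih hk']
    have hget : PySem.List.pyGetD l (k : Int) ' ' = l[k] := by
      rw [PySem.List.pyGetD_natCast]
      simp [List.getD, hlt]
    have hslice : PySem.List.slice l (some 0) (some (k : Int)) = l.take k := by
      rw [PySem.List.slice_zero_start, PySem.List.slice_to_natCast]
    have htake : l.take (k + 1) = l.take k ++ [l[k]] := by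
      rw [List.take_succ]
      simp [hlt]
    have hfin : (l.take (k + 1)).toFinset = insert l[k] (l.take k).toFinset := by
      rw [htake, List.toFinset_append]
      simp
    rw [hfin]
    simp only [List.foldl_cons, List.foldl_nil]
    by_cases hmem : l[k] ∈ (l.take k).toFinset
    · rw [Finset.card_insert_of_mem hmem]
      unfold diffeStep
      rcases Nat.eq_zero_or_pos k with h0 | hpos
      · subst h0; simp at hmem
      · have hne : ((k : Int) == 0) = false := by simp; omega
        have hcontains : (l.take k).contains l[k] = true := by simpa using hmem
        rw [hne, hget, hslice, hcontains]
        simp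
    · rw [Finset.card_insert_of_notMem hmem]
      unfold diffeStep
      rcases Nat.eq_zero_or_pos k with h0 | hpos
      · subst h0; simp
      · have hne : ((k : Int) == 0) = false := by simp; omega
        have hcontains : (l.take k).contains l[k] = false := by simpa using hmem
        rw [hne, hget, hslice, hcontains]
        simp only [Bool.false_eq_true, if_false]
        push_cast
        ring

-- 2 ≤ #distinct(h :: t) iff some element of t differs from h
theorem two_le_card_iff (h : Char) (t : List Char) :
    (2 ≤ ((h :: t).toFinset.card)) ↔ t.any (fun c => c != h) := by
  constructor
  · intro hc
    rw [List.any_eq_true]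
    by_contra hall
    push_neg at hall
    have hsub : (h :: t).toFinset ⊆ {h} := by
      intro x hx
      simp at hx
      rcases hx with rfl | hx
      · simp
      · have := hall x hx
        simp at this
        simp [this]
    have := Finset.card_le_card hsub
    rw [Finset.card_singleton] at this
    omega
  · intro ha
    rw [List.any_eq_true] at ha
    obtain ⟨c, hc, hne⟩ := ha
    simp at hne
    have h1 : h ∈ (h :: t).toFinset := by simp
    have h2 : c ∈ (h :: t).toFinset := by simp [hc]
    have : ({h, c} : Finset Char) ⊆ (h :: t).toFinset := by
      intro x hx
      simp at hx
      rcases hx with rfl | rfl <;> assumption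
    have hle := Finset.card_le_card this
    rwa [Finset.card_insert_of_notMem (by simp [Ne.symm hne]), Finset.card_singleton] at hle

-- ===== VERDICT (by name: the statement is the Claim_ definition above) =====
theorem diffe_spec : Claim_equal_diffe := by
  intro ch _
  unfold Spec_diffe diffe diffe_alt
  simp only
  rw [diffe_fold_inv ch.toList ch.toList.length le_rfl, List.take_length]
  cases hl : ch.toList with
  | nil => simp
  | cons first rest =>
    have hiff := two_le_card_iff first rest
    by_cases hany : rest.any (fun c => c != first)
    · have h2 : ((2 : Int) ≤ ((first :: rest).toFinset.card : Int)) := by exact_mod_cast hiff.mpr hany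
      rw [if_pos h2]
      simp [hany]
    · have h2 : ¬ ((2 : Int) ≤ ((first :: rest).toFinset.card : Int)) := by
        intro h; exact hany (hiff.mp (by exact_mod_cast h))
      rw [if_neg h2]
      simp [hany]
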